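-- pv_equiv track=rewrite | github.com/Benson1198/Practice-Problems | Hash Map(Dictionary)/Count Distinct Elements in every window.py | countDistinct
-- ===== SOURCE A (Python) =====
-- def countDistinct(arr, N, K):
--     res = []
--     if N > K:
--         for i in range(N-K+1):
--             res.append(len(set(arr[i:i+K])))
--
--     else:
--         res.append(len(set(arr)))
--
--     return res
-- ===== SOURCE B (Python) =====
-- def countDistinct(arr, N, K):
--     if N <= K:
--         return [len(set(arr))]
--     counts = {}
--     distinct = 0
--     for j in range(K):
--         x = arr[j]
--         c = counts.get(x, 0)
--         if c == 0:
--             distinct += 1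
--         counts[x] = c + 1
--     res = [distinct]
--     for i in range(K, N):
--         x = arr[i]
--         c = counts.get(x, 0)
--         if c == 0:
--             distinct += 1
--         counts[x] = c + 1
--         y = arr[i - K]
--         c2 = counts[y]
--         counts[y] = c2 - 1
--         if c2 == 1:
--             distinct -= 1
--         res.append(distinct)
--     return res
-- ===== Notes on version B (the rewrite author's own statement) =====
-- stated objective: alternative
-- what changed: A rebuilds a Python set from scratch for every window (O(N*K) work in the windowed case); B slides a single window once over the array keeping a hashmap of element counts and an incremental distinct counter (O(N) in the windowed case; in the N<=K case both compute one set, so the measured largest-size cost is unchanged).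
-- outside the precondition, e.g. on countDistinct([1, 2], 5, 1): A returns [1, 1, 0, 0, 0], B raises IndexError; on countDistinct([1, 2, 3], 3, -1): A returns [2, 0, 0, 0, 0], B raises KeyError
import Mathlib
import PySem

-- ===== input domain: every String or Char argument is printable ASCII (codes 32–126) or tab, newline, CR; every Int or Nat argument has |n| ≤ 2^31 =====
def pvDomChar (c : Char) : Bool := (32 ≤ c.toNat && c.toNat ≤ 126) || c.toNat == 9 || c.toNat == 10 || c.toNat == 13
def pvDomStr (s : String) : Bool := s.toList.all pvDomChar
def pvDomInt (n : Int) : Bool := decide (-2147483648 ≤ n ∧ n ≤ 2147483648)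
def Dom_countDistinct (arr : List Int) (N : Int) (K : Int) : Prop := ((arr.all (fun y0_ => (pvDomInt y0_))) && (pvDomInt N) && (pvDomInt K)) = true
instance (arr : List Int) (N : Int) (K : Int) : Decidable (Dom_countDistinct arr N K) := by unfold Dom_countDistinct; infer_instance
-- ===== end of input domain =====

-- B replaces A's per-window set construction by one sliding pass with a count hashmap
-- and an incremental distinct counter (a different algorithm; return value only, no mutation).

-- ===== PORT A =====
-- literal port of A: for each i append len(set(arr[i:i+K]))
def countDistinct (arr : List Int) (N : Int) (K : Int) : List Int :=
  if N > K then
    (PySem.List.pyRange 0 (N - K + 1)).foldl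
      (fun res i => res ++ [((PySem.Set.ofList (PySem.List.slice arr (some i) (some (i + K)))).length : Int)])
      []
  else
    [((PySem.Set.ofList arr).length : Int)]

-- ===== PORT B =====
-- literal port of Source B; arr[j] is ported as pyGetD arr j 0 (exact inside Pre_, where every index
-- accessed is in range) and counts[y] as Dict.getD counts y 0 (exact inside Pre_, where y is present)
def countDistinct_alt (arr : List Int) (N : Int) (K : Int) : List Int :=
  if N ≤ K then
    [((PySem.Set.ofList arr).length : Int)]
  else
    let s1 : PySem.Dict Int Int × Int :=
      (PySem.List.pyRange 0 K).foldl
        (fun st j =>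
          let x := PySem.List.pyGetD arr j 0
          let c := PySem.Dict.getD st.1 x 0
          (PySem.Dict.insert st.1 x (c + 1), if c = 0 then st.2 + 1 else st.2))
        (PySem.Dict.empty, 0)
    let s2 : PySem.Dict Int Int × Int × List Int :=
      (PySem.List.pyRange K N).foldl
        (fun st i =>
          let x := PySem.List.pyGetD arr i 0
          let c := PySem.Dict.getD st.1 x 0
          let d1 := if c = 0 then st.2.1 + 1 else st.2.1
          let m1 := PySem.Dict.insert st.1 x (c + 1)
          let y := PySem.List.pyGetD arr (i - K) 0
          let c2 := PySem.Dict.getD m1 y 0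
          let m2 := PySem.Dict.insert m1 y (c2 - 1)
          let d2 := if c2 = 1 then d1 - 1 else d1
          (m2, d2, st.2.2 ++ [d2]))
        (s1.1, s1.2, [s1.2])
    s2.2.2

-- ===== PRECONDITION & SPEC =====
-- Pre_ keeps the natural call contract (N = len(arr) with K a window size is the intended use):
-- it excludes windowed calls (N > K) with a negative K, where A's windows come from Python's
-- negative-slice wraparound, and with N > len(arr), where A silently emits truncated/empty windows;
-- B's index-based sliding window raises IndexError/KeyError on those inputs.
def Pre_countDistinct (arr : List Int) (N : Int) (K : Int) : Prop :=
  N ≤ K ∨ (0 ≤ K ∧ N ≤ (arr.length : Int))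
instance (arr : List Int) (N : Int) (K : Int) : Decidable (Pre_countDistinct arr N K) := by
  unfold Pre_countDistinct; infer_instance
def pvWitness_countDistinct : List Int × Int × Int := ([1, 2, 1], 3, 2)

def Spec_countDistinct (arr : List Int) (N : Int) (K : Int) (out : List Int) : Prop := out = countDistinct_alt arr N K
instance (arr : List Int) (N : Int) (K : Int) (out : List Int) : Decidable (Spec_countDistinct arr N K out) := by unfold Spec_countDistinct; infer_instance

-- ===== CLAIM (what is proved, stated in full; the proofs are below) =====
def Claim_equal_countDistinct : Prop := ∀ (arr : List Int) (N : Int) (K : Int), Dom_countDistinct arr N K → Pre_countDistinct arr N K → Spec_countDistinct arr N K (countDistinct arr N K)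

-- ===== LEMMAS AND PROOFS =====

-- the step functions of B's two loops (definitionally equal to the lambdas in countDistinct_alt)
def bStep1 (arr : List Int) (st : PySem.Dict Int Int × Int) (j : Int) : PySem.Dict Int Int × Int :=
  let x := PySem.List.pyGetD arr j 0
  let c := PySem.Dict.getD st.1 x 0
  (PySem.Dict.insert st.1 x (c + 1), if c = 0 then st.2 + 1 else st.2)

def bStep2 (arr : List Int) (K : Int) (st : PySem.Dict Int Int × Int × List Int) (i : Int) :
    PySem.Dict Int Int × Int × List Int :=
  let x := PySem.List.pyGetD arr i 0
  let c := PySem.Dict.getD st.1 x 0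
  let d1 := if c = 0 then st.2.1 + 1 else st.2.1
  let m1 := PySem.Dict.insert st.1 x (c + 1)
  let y := PySem.List.pyGetD arr (i - K) 0
  let c2 := PySem.Dict.getD m1 y 0
  let m2 := PySem.Dict.insert m1 y (c2 - 1)
  let d2 := if c2 = 1 then d1 - 1 else d1
  (m2, d2, st.2.2 ++ [d2])

-- the dict of B's loops always holds exactly the multiset of the current window w
def Models (d : PySem.Dict Int Int) (w : List Int) : Prop :=
  ∀ v : Int, PySem.Dict.getD d v 0 = (w.count v : Int)

-- number of distinct elements of a list, as A computes it
theorem setLen_eq_card (w : List Int) :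
    (PySem.Set.ofList w).length = w.toFinset.card := by
  have h1 : (PySem.Set.ofList w).toFinset = w.toFinset := by
    ext a; simp [List.mem_toFinset, PySem.Set.mem_ofList]
  rw [← h1, List.toFinset_card_of_nodup (PySem.Set.nodup_ofList w)]

theorem models_add (d : PySem.Dict Int Int) (w : List Int) (x : Int) (h : Models d w) :
    Models (PySem.Dict.insert d x (PySem.Dict.getD d x 0 + 1)) (w ++ [x]) := by
  intro v
  rw [PySem.Dict.getD_insert]
  by_cases hv : v = x
  · subst hv; rw [if_pos rfl, h v]; simp [List.count_append]
  · rw [if_neg hv, h v]; simp [List.count_append, Ne.symm hv]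

theorem models_remove (d : PySem.Dict Int Int) (z : Int) (v : List Int) (h : Models d (z :: v)) :
    Models (PySem.Dict.insert d z (PySem.Dict.getD d z 0 - 1)) v := by
  intro u
  rw [PySem.Dict.getD_insert]
  by_cases hu : u = z
  · subst hu; rw [if_pos rfl, h u]; simp
  · rw [if_neg hu, h u]; simp [Ne.symm hu]

theorem card_append (w : List Int) (x : Int) :
    ((w ++ [x]).toFinset.card : Int) = if (w.count x : Int) = 0 then (w.toFinset.card : Int) + 1 else (w.toFinset.card : Int) := by
  by_cases hx : x ∈ w
  · have : (w ++ [x]).toFinset = w.toFinset := by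
      simp [List.toFinset_append, Finset.insert_eq_self.mpr (List.mem_toFinset.mpr hx)]
    rw [this, if_neg (by simpa [List.count_eq_zero] using hx)]
  · have : (w ++ [x]).toFinset = insert x w.toFinset := by
      simp [List.toFinset_append]
    rw [this, Finset.card_insert_of_notMem (by simpa using hx), if_pos]
    · push_cast; ring
    · simpa [List.count_eq_zero] using hx

theorem card_cons (z : Int) (v : List Int) :
    ((v.toFinset.card : Int)) = if ((z :: v).count z : Int) = 1 then ((z :: v).toFinset.card : Int) - 1 else ((z :: v).toFinset.card : Int) := by
  have hc : ((z :: v).count z : Int) = (v.count z : Int) + 1 := by simp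
  by_cases hz : z ∈ v
  · have h1 : (z :: v).toFinset = v.toFinset := by simp [Finset.insert_eq_self.mpr (List.mem_toFinset.mpr hz)]
    rw [h1, if_neg]
    rw [hc]
    have : 1 ≤ v.count z := List.one_le_count_iff.mpr hz
    omega
  · have h1 : (z :: v).toFinset = insert z v.toFinset := by simp
    rw [h1, Finset.card_insert_of_notMem (by simpa using hz), if_pos]
    · push_cast; ring
    · rw [hc]; have : v.count z = 0 := List.count_eq_zero.mpr hz; omega

theorem pyRange_self (a : Int) : PySem.List.pyRange a a = [] := by
  simp [PySem.List.pyRange]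

theorem loop1_inv (arr : List Int) (j : Nat) (hj : j ≤ arr.length) :
    Models ((PySem.List.pyRange 0 (j : Int)).foldl (bStep1 arr) (PySem.Dict.empty, 0)).1 (arr.take j) ∧
    ((PySem.List.pyRange 0 (j : Int)).foldl (bStep1 arr) (PySem.Dict.empty, 0)).2 = (((arr.take j).toFinset.card : Nat) : Int) := by
  induction j with
  | zero =>
    rw [show ((0 : Nat) : Int) = 0 by norm_num, pyRange_self]
    exact ⟨fun v => by simp, by simp⟩
  | succ j ih =>
    obtain ⟨ihm, ihc⟩ := ih (by omega)
    have hjl : j < arr.length := by omega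
    have hcast : ((j + 1 : Nat) : Int) = (j : Int) + 1 := by push_cast; ring
    rw [hcast, PySem.List.pyRange_one_succ_right (by omega), List.foldl_append]
    set st := (PySem.List.pyRange 0 (j : Int)).foldl (bStep1 arr) (PySem.Dict.empty, 0) with hst
    have hx : PySem.List.pyGetD arr (j : Int) 0 = arr[j] := by
      rw [PySem.List.pyGetD_natCast, List.getD_eq_getElem?_getD, List.getElem?_eq_getElem hjl]
      rfl
    have htake : arr.take (j + 1) = arr.take j ++ [arr[j]] := by
      rw [List.take_add_one, List.getElem?_eq_getElem hjl]
      rfl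
    constructor
    · show Models (bStep1 arr st (j : Int)).1 (arr.take (j + 1))
      simp only [bStep1, hx]
      rw [htake]
      exact models_add st.1 (arr.take j) arr[j] ihm
    · show (bStep1 arr st (j : Int)).2 = _
      have hcnt : PySem.Dict.getD st.1 arr[j] 0 = (((arr.take j).count arr[j] : Nat) : Int) := ihm arr[j]
      simp only [bStep1, hx, hcnt, htake, ihc]
      exact (card_append (arr.take j) arr[j]).symm

def bInit (arr : List Int) (k : Nat) : PySem.Dict Int Int × Int × List Int :=
  (((PySem.List.pyRange 0 (k : Int)).foldl (bStep1 arr) (PySem.Dict.empty, 0)).1,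
   ((PySem.List.pyRange 0 (k : Int)).foldl (bStep1 arr) (PySem.Dict.empty, 0)).2,
   [((PySem.List.pyRange 0 (k : Int)).foldl (bStep1 arr) (PySem.Dict.empty, 0)).2])

def bSt (arr : List Int) (k t : Nat) : PySem.Dict Int Int × Int × List Int :=
  (PySem.List.pyRange (k : Int) ((k : Int) + (t : Int))).foldl (bStep2 arr (k : Int)) (bInit arr k)

theorem loop2_inv (arr : List Int) (k n t : Nat) (hk : k < n) (hn : n ≤ arr.length)
    (ht : t ≤ n - k) :
    Models (bSt arr k t).1 ((arr.drop t).take k) ∧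
    (bSt arr k t).2.1 = ((((arr.drop t).take k).toFinset.card : Nat) : Int) ∧
    (bSt arr k t).2.2 = (List.range (t + 1)).map (fun i => ((((arr.drop i).take k).toFinset.card : Nat) : Int)) := by
  induction t with
  | zero =>
    obtain ⟨h1, h2⟩ := loop1_inv arr k (by omega)
    rw [show bSt arr k 0 = bInit arr k by
      rw [bSt, show ((k : Int) + ((0 : Nat) : Int)) = (k : Int) by norm_num, pyRange_self]; rfl]
    exact ⟨by simpa [bInit] using h1, by simpa [bInit] using h2, by simp [bInit, h2]⟩
  | succ t ih =>
    obtain ⟨ihm, ihc, ihr⟩ := ih (by omega)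
    have hklen : t + k < arr.length := by omega
    have htlen : t < arr.length := by omega
    have hstep : bSt arr k (t + 1) = bStep2 arr (k : Int) (bSt arr k t) ((k : Int) + (t : Int)) := by
      rw [bSt, show (k : Int) + ((t + 1 : Nat) : Int) = ((k : Int) + (t : Int)) + 1 by push_cast; ring,
        PySem.List.pyRange_one_succ_right (by omega), List.foldl_append]
      rfl
    have hx : PySem.List.pyGetD arr ((k : Int) + (t : Int)) 0 = arr[t + k] := by
      rw [show (k : Int) + (t : Int) = ((t + k : Nat) : Int) by push_cast; ring,
        PySem.List.pyGetD_natCast, List.getD_eq_getElem?_getD, List.getElem?_eq_getElem hklen]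
      rfl
    have hy : PySem.List.pyGetD arr ((k : Int) + (t : Int) - (k : Int)) 0 = arr[t] := by
      rw [show (k : Int) + (t : Int) - (k : Int) = ((t : Nat) : Int) by ring,
        PySem.List.pyGetD_natCast, List.getD_eq_getElem?_getD, List.getElem?_eq_getElem htlen]
      rfl
    have hlt : k < (arr.drop t).length := by simp [List.length_drop]; omega
    have hgrow : (arr.drop t).take k ++ [arr[t + k]] = (arr.drop t).take (k + 1) := by
      rw [List.take_add_one, List.getElem?_eq_getElem hlt, List.getElem_drop]
      rfl
    have hshift : (arr.drop t).take (k + 1) = arr[t] :: (arr.drop (t + 1)).take k := by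
      rw [List.drop_eq_getElem_cons htlen]
      rfl
    have hm1 : Models (PySem.Dict.insert (bSt arr k t).1 arr[t + k]
        (PySem.Dict.getD (bSt arr k t).1 arr[t + k] 0 + 1))
        (arr[t] :: (arr.drop (t + 1)).take k) := by
      rw [← hshift, ← hgrow]
      exact models_add (bSt arr k t).1 _ _ ihm
    have hcnt2 := hm1 arr[t]
    rw [ihm arr[t + k]] at hcnt2
    have e1 : (if ((((arr.drop t).take k).count arr[t + k] : Nat) : Int) = 0
        then ((((arr.drop t).take k).toFinset.card : Nat) : Int) + 1
        else ((((arr.drop t).take k).toFinset.card : Nat) : Int))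
        = ((((arr[t] :: (arr.drop (t + 1)).take k).toFinset.card : Nat) : Int)) := by
      rw [← card_append ((arr.drop t).take k) arr[t + k], hgrow, hshift]
    have e2 : ((((arr.drop (t + 1)).take k).toFinset.card : Nat) : Int)
        = (if (((arr[t] :: (arr.drop (t + 1)).take k).count arr[t] : Nat) : Int) = 1
           then (((arr[t] :: (arr.drop (t + 1)).take k).toFinset.card : Nat) : Int) - 1
           else (((arr[t] :: (arr.drop (t + 1)).take k).toFinset.card : Nat) : Int)) :=
      card_cons arr[t] ((arr.drop (t + 1)).take k)
    refine ⟨?_, ?_, ?_⟩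
    · show Models (bSt arr k (t + 1)).1 _
      rw [hstep]
      simp only [bStep2, hx, hy]
      exact models_remove _ arr[t] ((arr.drop (t + 1)).take k) hm1
    · rw [hstep]
      simp only [bStep2, hx, hy, ihm arr[t + k], ihc, hcnt2, e1]
      exact e2.symm
    · rw [hstep]
      simp only [bStep2, hx, hy, ihm arr[t + k], ihc, hcnt2, e1, ihr]
      rw [← e2, List.range_succ]
      simp [List.range_succ]

theorem alt_eq_bSt (arr : List Int) (k n : Nat) (h : ¬ ((n : Int) ≤ (k : Int))) :
    countDistinct_alt arr (n : Int) (k : Int) =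
      ((PySem.List.pyRange (k : Int) (n : Int)).foldl (bStep2 arr (k : Int)) (bInit arr k)).2.2 := by
  simp only [countDistinct_alt, if_neg h]
  rfl

-- ===== VERDICT (by name: the statement is the Claim_ definition above) =====
theorem countDistinct_spec : Claim_equal_countDistinct := by
  intro arr N K _hdom hpre
  unfold Spec_countDistinct
  by_cases hNK : N ≤ K
  · unfold countDistinct countDistinct_alt
    rw [if_neg (by omega), if_pos hNK]
  · obtain ⟨hK, hN⟩ := hpre.resolve_left hNK
    have hKk : K = (K.toNat : Int) := (Int.toNat_of_nonneg hK).symm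
    have hNn : N = (N.toNat : Int) := (Int.toNat_of_nonneg (by omega)).symm
    set k := K.toNat
    set n := N.toNat
    have hkn : k < n := by omega
    have hnl : n ≤ arr.length := by omega
    rw [hKk, hNn]
    have hA : countDistinct arr (n : Int) (k : Int) =
        (List.range (n - k + 1)).map (fun i => ((((arr.drop i).take k).toFinset.card : Nat) : Int)) := by
      unfold countDistinct
      rw [if_pos (by omega : ((n : Int) > (k : Int)))]
      rw [PySem.List.foldl_append_singleton_eq_map, List.nil_append,
        show ((n : Int) - (k : Int) + 1) = ((n - k + 1 : Nat) : Int) by omega,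
        PySem.List.pyRange_zero_natCast, List.map_map]
      refine List.map_congr_left fun i _ => ?_
      show ((PySem.Set.ofList (PySem.List.slice arr (some (i : Int)) (some ((i : Int) + (k : Int))))).length : Int) = _
      rw [PySem.List.slice_natCast_add, setLen_eq_card]
    have hB := (loop2_inv arr k n (n - k) hkn hnl (le_refl _)).2.2
    have hBe : countDistinct_alt arr (n : Int) (k : Int) = (bSt arr k (n - k)).2.2 := by
      rw [alt_eq_bSt arr k n (by omega)]
      rw [show ((n : Int)) = (k : Int) + ((n - k : Nat) : Int) by omega]
      rfl
    rw [hA, hBe, hB]
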